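-- pv_equiv track=rewrite | github.com/alexballera/introduccion-programacion | parciales/python/Solucion_t2.py | pos_umbral
-- ===== SOURCE A (Python) =====
-- def pos_umbral(s: list[int], u: int) -> int:
--   suma: int = 0
--   for i in range(0, len(s)):
--     if (s[i] >= 0):
--       suma += s[i]
--     if(suma > u):
--       return i
--   return -1
-- ===== SOURCE B (Python) =====
-- def pos_umbral(s: list[int], u: int) -> int:
--   # Two-pass: build the clamped prefix-sum table, then find the first crossing.
--   prefixes = []
--   acc = 0
--   for x in s:
--     acc += max(x, 0)
--     prefixes.append(acc)
--   return next((i for i, v in enumerate(prefixes) if v > u), -1)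
-- ===== Notes on version B (the rewrite author's own statement) =====
-- stated objective: idiomatic
-- what changed: B first materialises the clamped prefix-sum table (acc += max(x,0)) and then locates the first index exceeding u with next(enumerate(...), -1), instead of A's single index loop interleaving accumulation, guard and early return.
import Mathlib
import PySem

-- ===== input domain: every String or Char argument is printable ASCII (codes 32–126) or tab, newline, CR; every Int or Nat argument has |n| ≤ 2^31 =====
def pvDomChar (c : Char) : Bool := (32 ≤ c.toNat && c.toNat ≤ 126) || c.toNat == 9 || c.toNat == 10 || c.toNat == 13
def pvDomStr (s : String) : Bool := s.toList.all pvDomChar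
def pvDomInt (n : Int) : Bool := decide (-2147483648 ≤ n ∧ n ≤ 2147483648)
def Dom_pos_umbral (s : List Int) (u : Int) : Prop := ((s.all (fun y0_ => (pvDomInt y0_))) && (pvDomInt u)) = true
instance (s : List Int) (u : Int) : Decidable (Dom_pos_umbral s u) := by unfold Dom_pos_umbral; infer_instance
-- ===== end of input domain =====

-- B builds the clamped prefix-sum table first and then scans it for the first index over u;
-- A interleaves accumulation and the threshold check in one indexed loop. Same values everywhere.

-- ===== PORT A =====
-- A's for-loop over range(0, len(s)) with early return, as recursion over the
-- remaining list carrying the current index i and the running sum suma.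
def pos_umbral_go (u : Int) (suma : Int) (i : Nat) : List Int → Int
  | [] => -1
  | x :: xs =>
    let suma' := if x ≥ 0 then suma + x else suma
    if suma' > u then (i : Int) else pos_umbral_go u suma' (i + 1) xs

def pos_umbral (s : List Int) (u : Int) : Int := pos_umbral_go u 0 0 s

-- ===== PORT B =====
-- pass 1: acc += max(x, 0); prefixes.append(acc)
def pos_umbral_prefixes (acc : Int) : List Int → List Int
  | [] => []
  | x :: xs => let a := acc + max x 0; a :: pos_umbral_prefixes a xs

-- pass 2: next((i for i, v in enumerate(prefixes) if v > u), -1)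
def pos_umbral_first (u : Int) (i : Nat) : List Int → Int
  | [] => -1
  | v :: vs => if v > u then (i : Int) else pos_umbral_first u (i + 1) vs

def pos_umbral_alt (s : List Int) (u : Int) : Int :=
  pos_umbral_first u 0 (pos_umbral_prefixes 0 s)

-- ===== PRECONDITION & SPEC =====
def Spec_pos_umbral (s : List Int) (u : Int) (out : Int) : Prop := out = pos_umbral_alt s u
instance (s : List Int) (u : Int) (out : Int) : Decidable (Spec_pos_umbral s u out) := by unfold Spec_pos_umbral; infer_instance

-- ===== CLAIM (what is proved, stated in full; the proofs are below) =====
def Claim_equal_pos_umbral : Prop := ∀ (s : List Int) (u : Int), Dom_pos_umbral s u → Spec_pos_umbral s u (pos_umbral s u)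

-- ===== LEMMAS AND PROOFS =====
theorem pos_umbral_go_eq (u : Int) (l : List Int) : ∀ (suma : Int) (i : Nat),
    pos_umbral_go u suma i l = pos_umbral_first u i (pos_umbral_prefixes suma l) := by
  induction l with
  | nil => intro suma i; rfl
  | cons x xs ih =>
    intro suma i
    have h : (if x ≥ 0 then suma + x else suma) = suma + max x 0 := by
      by_cases hx : x ≥ 0 <;> simp [hx] <;> omega
    simp only [pos_umbral_go, pos_umbral_prefixes, pos_umbral_first, h, ih]

-- ===== VERDICT (by name: the statement is the Claim_ definition above) =====
theorem pos_umbral_spec : Claim_equal_pos_umbral := by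
  intro s u _
  unfold Spec_pos_umbral pos_umbral pos_umbral_alt
  exact pos_umbral_go_eq u s 0 0
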